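-- pv_equiv track=rewrite | github.com/kwaibun/requests | requests/utils.py | unquote_unreserved
-- ===== SOURCE A (Python) =====
-- UNRESERVED_SET = frozenset(
--     "ABCDEFGHIJKLMNOPQRSTUVWXYZabcdefghijklmnopqrstuvwxyz"
--     + "0123456789-._~")
--
-- def unquote_unreserved(uri):
--     """Un-escape any percent-escape sequences in a URI that are unreserved
--     characters. This leaves all reserved, illegal and non-ASCII bytes encoded.
--     """
--     try:
--         parts = uri.split('%')
--         for i in range(1, len(parts)):
--             h = parts[i][0:2]
--             if len(h) == 2 and h.isalnum():
--                 c = chr(int(h, 16))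
--                 if c in UNRESERVED_SET:
--                     parts[i] = c + parts[i][2:]
--                 else:
--                     parts[i] = '%' + parts[i]
--             else:
--                 parts[i] = '%' + parts[i]
--         return ''.join(parts)
--     except ValueError:
--         return uri
-- ===== SOURCE B (Python) =====
-- UNRESERVED_SET = frozenset(
--     "ABCDEFGHIJKLMNOPQRSTUVWXYZabcdefghijklmnopqrstuvwxyz"
--     + "0123456789-._~")
--
-- def unquote_unreserved(uri):
--     """Un-escape unreserved percent-escapes by a single left-to-right scan
--     over the characters instead of split('%')/join."""
--     out = []
--     i = 0
--     n = len(uri)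
--     while i < n:
--         ch = uri[i]
--         if ch == '%':
--             h = uri[i + 1:i + 3]
--             if len(h) == 2 and h.isalnum():
--                 try:
--                     code = int(h, 16)
--                 except ValueError:
--                     return uri
--                 c = chr(code)
--                 if c in UNRESERVED_SET:
--                     out.append(c)
--                     i += 3
--                     continue
--             out.append('%')
--             i += 1
--         else:
--             out.append(ch)
--             i += 1
--     return ''.join(out)
-- ===== Notes on version B (the rewrite author's own statement) =====
-- stated objective: alternative
-- what changed: Replaced A's split-on-percent / per-part rewrite / join pipeline with a single left-to-right character scanner that emits output as it goes, decoding an escape when the two following characters are an alphanumeric pair naming an unreserved character.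
import Mathlib
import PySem

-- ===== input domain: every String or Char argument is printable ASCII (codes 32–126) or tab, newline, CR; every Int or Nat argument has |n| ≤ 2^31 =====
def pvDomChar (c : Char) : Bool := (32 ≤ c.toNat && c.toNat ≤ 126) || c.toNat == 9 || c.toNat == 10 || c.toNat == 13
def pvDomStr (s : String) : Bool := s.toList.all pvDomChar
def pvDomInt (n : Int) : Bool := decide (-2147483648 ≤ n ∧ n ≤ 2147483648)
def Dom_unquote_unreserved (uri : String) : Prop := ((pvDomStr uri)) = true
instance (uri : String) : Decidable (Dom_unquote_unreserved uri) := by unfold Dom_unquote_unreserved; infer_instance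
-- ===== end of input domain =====

-- B rewrites the split('%')/join pass of A as a single left-to-right character scanner; same return value, objective: alternative decomposition.

-- ===== PORT A =====
-- shared module constant UNRESERVED_SET
def pvUnreserved : PySem.Set Char :=
  PySem.Set.ofList ("ABCDEFGHIJKLMNOPQRSTUVWXYZabcdefghijklmnopqrstuvwxyz0123456789-._~".toList)

-- body of A's loop for one part parts[i] (i ≥ 1); none = ValueError from int(h, 16)
def pvPartA (p : List Char) : Option (List Char) :=
  let h := PySem.List.slice p (some 0) (some 2)
  if h.length == 2 && PySem.Chars.strIsalnum h then
    match PySem.Int.ofCharsBase? h 16 with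
    | none => none
    | some n =>
      let c := Char.ofNat n.toNat
      if PySem.Set.contains pvUnreserved c then
        some (c :: PySem.List.slice p (some 2) none)
      else some ('%' :: p)
  else some ('%' :: p)

-- A's for-loop over parts[1:]; none propagates the ValueError
def pvLoopA : List (List Char) → Option (List (List Char))
  | [] => some []
  | p :: ps =>
    match pvPartA p with
    | none => none
    | some q => (pvLoopA ps).map (q :: ·)

def unquote_unreserved (uri : String) : String :=
  match PySem.Chars.splitOn uri.toList ['%'] with
  | [] => uri
  | p0 :: rest =>
    match pvLoopA rest with
    | none => uri
    | some qs => String.mk (PySem.Chars.join [] (p0 :: qs))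

-- ===== PORT B =====
-- B's while-loop: scan the characters once; none = the ValueError caught by B (return uri).
-- 'h = uri[i+1:i+3]; len(h) == 2' is ported as the two-element pattern match on the remaining characters.
def pvScanB : List Char → Option (List Char)
  | [] => some []
  | c :: rest =>
    if c = '%' then
      match rest with
      | a :: b :: t' =>
        if PySem.Chars.strIsalnum [a, b] then
          match PySem.Int.ofCharsBase? [a, b] 16 with
          | none => none
          | some n =>
            let ch := Char.ofNat n.toNat
            if PySem.Set.contains pvUnreserved ch then
              (pvScanB t').map (ch :: ·)
            else (pvScanB (a :: b :: t')).map ('%' :: ·)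
        else (pvScanB (a :: b :: t')).map ('%' :: ·)
      | [] => (pvScanB []).map ('%' :: ·)       -- len(h) < 2
      | [a] => (pvScanB [a]).map ('%' :: ·)    -- len(h) < 2
    else (pvScanB rest).map (c :: ·)

def unquote_unreserved_alt (uri : String) : String :=
  match pvScanB uri.toList with
  | none => uri
  | some cs => String.mk cs

-- ===== PRECONDITION & SPEC =====
def Spec_unquote_unreserved (uri : String) (out : String) : Prop := out = unquote_unreserved_alt uri
instance (uri : String) (out : String) : Decidable (Spec_unquote_unreserved uri out) := by unfold Spec_unquote_unreserved; infer_instance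

-- ===== CLAIM (what is proved, stated in full; the proofs are below) =====
def Claim_equal_unquote_unreserved : Prop := ∀ (uri : String), Dom_unquote_unreserved uri → Spec_unquote_unreserved uri (unquote_unreserved uri)

-- ===== LEMMAS AND PROOFS =====

-- reference single-char split (structural recursion), to reason about splitOn
def sp : List Char → List (List Char)
  | [] => [[]]
  | c :: rest =>
    if c = '%' then [] :: sp rest
    else
      match sp rest with
      | [] => [[c]]
      | p :: ps => (c :: p) :: ps

lemma sp_ne_nil (cs : List Char) : sp cs ≠ [] := by
  cases cs with
  | nil => simp [sp]
  | cons c rest =>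
    simp only [sp]
    split
    · simp
    · split <;> simp

lemma sp_head (t : List Char) : ∃ rest, sp t = (t.takeWhile (· ≠ '%')) :: rest := by
  induction t with
  | nil => exact ⟨[], rfl⟩
  | cons c rest ih =>
    by_cases hc : c = '%'
    · subst hc; exact ⟨sp rest, by simp [sp, List.takeWhile]⟩
    · obtain ⟨r, hr⟩ := ih
      refine ⟨r, ?_⟩
      simp [sp, hc, hr, List.takeWhile]

lemma go_eq : ∀ (fuel : Nat) (l cur : List Char) (acc : List (List Char)), l.length < fuel →
    PySem.Chars.splitOn.go ['%'] fuel l cur acc =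
      acc.reverse ++ (match sp l with
        | [] => []
        | p :: ps => (cur.reverse ++ p) :: ps) := by
  intro fuel
  induction fuel with
  | zero => intro l cur acc h; omega
  | succ n ih =>
    intro l cur acc h
    cases l with
    | nil => simp [PySem.Chars.splitOn.go, sp]
    | cons c rest =>
      by_cases hc : c = '%'
      · subst hc
        have hpre : List.isPrefixOf ['%'] ('%' :: rest) = true := by simp [List.isPrefixOf]
        rw [PySem.Chars.splitOn.go, if_pos hpre]
        simp only [List.length_cons] at h
        rw [ih _ _ _ (by simpa using Nat.lt_of_succ_lt_succ h)]
        obtain ⟨r, hr⟩ := sp_head rest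
        simp [sp, hr]
      · have hpre : List.isPrefixOf ['%'] (c :: rest) = false := by
          simp [List.isPrefixOf]; exact fun h' => (hc h'.symm).elim
        rw [PySem.Chars.splitOn.go, if_neg (by simp [hpre])]
        simp only [List.length_cons] at h
        rw [ih _ _ _ (by omega)]
        obtain ⟨r, hr⟩ := sp_head rest
        simp [sp, hc, hr]

lemma splitOn_eq_sp (cs : List Char) : PySem.Chars.splitOn cs ['%'] = sp cs := by
  rw [PySem.Chars.splitOn, go_eq (cs.length + 1) cs [] [] (by omega)]
  obtain ⟨r, hr⟩ := sp_head cs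
  simp [hr]

lemma join_nil_flatten (ps : List (List Char)) : PySem.Chars.join [] ps = ps.flatten := by
  rw [PySem.Chars.join]
  induction ps with
  | nil => rfl
  | cons p ps ih =>
    cases ps with
    | nil => simp [List.intercalate]
    | cons q qs =>
      simp [List.intercalate, List.intersperse] at ih ⊢
      simpa using ih

lemma slice02 (p : List Char) : PySem.List.slice p (some 0) (some 2) = p.take 2 := by
  simp [pysem]

lemma slice2none (p : List Char) : PySem.List.slice p (some 2) none = p.drop 2 := by
  simp [pysem]

-- A's per-part condition on parts[i] equals B's condition on the two characters after the '%'
lemma cond_eq (t : List Char) :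
    (((t.take 2).length == 2) && PySem.Chars.strIsalnum (t.take 2)) =
    ((((t.takeWhile (· ≠ '%')).take 2).length == 2) && PySem.Chars.strIsalnum ((t.takeWhile (· ≠ '%')).take 2)) := by
  have hp : PySem.Chars.isalnum '%' = false := by decide
  rcases t with _ | ⟨a, _ | ⟨b, t'⟩⟩
  · rfl
  · by_cases ha : a = '%' <;> simp [ha, List.takeWhile]
  · by_cases ha : a = '%'
    · simp [ha, List.takeWhile, PySem.Chars.strIsalnum, hp]
    · by_cases hb : b = '%'
      · simp [ha, hb, List.takeWhile, PySem.Chars.strIsalnum, hp]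
      · simp [ha, hb, List.takeWhile, PySem.Chars.strIsalnum]

lemma partA_keep (p : List Char)
    (h : (((p.take 2).length == 2) && PySem.Chars.strIsalnum (p.take 2)) = false) :
    pvPartA p = some ('%' :: p) := by
  simp only [pvPartA, slice02, h]
  simp

lemma partA_go (a b : Char) (u0 : List Char)
    (ha : PySem.Chars.isalnum a = true) (hb : PySem.Chars.isalnum b = true) :
    pvPartA (a :: b :: u0) =
      match PySem.Int.ofCharsBase? [a, b] 16 with
      | none => none
      | some n =>
        if PySem.Set.contains pvUnreserved (Char.ofNat n.toNat) then
          some (Char.ofNat n.toNat :: u0)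
        else some ('%' :: a :: b :: u0) := by
  have hcond : ((([a, b] : List Char).length == 2) && PySem.Chars.strIsalnum [a, b]) = true := by
    simp [PySem.Chars.strIsalnum, ha, hb]
  simp only [pvPartA, slice02, slice2none, List.take_succ_cons, List.take_zero, hcond]
  simp

lemma key : ∀ (n : Nat) (cs : List Char), cs.length ≤ n → ∀ p0 rest, sp cs = p0 :: rest →
    pvScanB cs = (pvLoopA rest).map (fun qs => p0 ++ qs.flatten) := by
  intro n
  induction n with
  | zero =>
    intro cs hlen p0 rest hsp
    have hcs : cs = [] := List.eq_nil_of_length_eq_zero (Nat.le_zero.mp hlen)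
    subst hcs
    simp [sp] at hsp
    obtain ⟨rfl, rfl⟩ := hsp
    simp [pvScanB, pvLoopA]
  | succ n ih =>
    intro cs hlen p0 rest hsp
    cases cs with
    | nil =>
      simp [sp] at hsp
      obtain ⟨rfl, rfl⟩ := hsp
      simp [pvScanB, pvLoopA]
    | cons c t =>
      simp only [List.length_cons] at hlen
      have hlt : t.length ≤ n := by omega
      by_cases hc : c = '%'
      · subst hc
        have e : sp ('%' :: t) = [] :: sp t := by rw [sp]; simp
        rw [e] at hsp
        injection hsp with h1 h2
        subst h1; subst h2
        rcases t with _ | ⟨a, _ | ⟨b, t'⟩⟩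
        · -- t = []
          simp [pvScanB, pvLoopA, sp]
          decide
        · -- t = [a]
          by_cases ha : a = '%' <;>
            simp [pvScanB, pvLoopA, ha, sp, partA_keep, List.takeWhile]
        · -- t = a :: b :: t'
          simp only [List.length_cons] at hlt
          by_cases hal : PySem.Chars.strIsalnum [a, b] = true
          · -- the two chars after '%' are alphanumeric
            have hab : PySem.Chars.isalnum a = true ∧ PySem.Chars.isalnum b = true := by
              simpa [PySem.Chars.strIsalnum] using hal
            have ha : a ≠ '%' := by rintro rfl; exact absurd hab.1 (by decide)
            have hb : b ≠ '%' := by rintro rfl; exact absurd hab.2 (by decide)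
            obtain ⟨u0, urest, hu⟩ := List.exists_cons_of_ne_nil (sp_ne_nil t')
            have h2 : sp (b :: t') = (b :: u0) :: urest := by rw [sp]; simp [hb, hu]
            have h1 : sp (a :: b :: t') = (a :: b :: u0) :: urest := by rw [sp]; simp [ha, h2]
            rw [h1]
            have hA := partA_go a b u0 hab.1 hab.2
            cases hparse : PySem.Int.ofCharsBase? [a, b] 16 with
            | none =>
              simp only [hparse] at hA
              simp [pvScanB, hal, hparse, pvLoopA, hA]
            | some nv =>
              simp only [hparse] at hA
              by_cases hmem : PySem.Set.contains pvUnreserved (Char.ofNat nv.toNat) = true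
              · rw [if_pos hmem] at hA
                have hIH := ih t' (by omega) u0 urest hu
                simp only [pvScanB, if_pos rfl, hal, hparse, hmem, if_true, hIH,
                  pvLoopA, hA]
                cases pvLoopA urest <;> simp
              · rw [if_neg hmem] at hA
                have hIH := ih (a :: b :: t') (by simp; omega) (a :: b :: u0) urest h1
                simp only [pvScanB, if_pos rfl, hal, hparse, hIH, pvLoopA, hA]
                rw [if_neg hmem]
                cases pvLoopA urest <;> simp
          · -- condition fails: both keep the escape
            have hal' : PySem.Chars.strIsalnum [a, b] = false := by
              simpa using hal
            obtain ⟨q0rest, hq⟩ := sp_head (a :: b :: t')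
            rw [hq]
            have hIH := ih (a :: b :: t') (by simp; omega) _ _ hq
            have hcond : ((((a :: b :: t').takeWhile (· ≠ '%')).take 2).length == 2 &&
                PySem.Chars.strIsalnum (((a :: b :: t').takeWhile (· ≠ '%')).take 2)) = false := by
              rw [← cond_eq]
              simp [hal']
            simp only [pvScanB, if_pos rfl, hal', Bool.false_eq_true, if_false, hIH,
              pvLoopA, partA_keep _ hcond]
            cases pvLoopA q0rest <;> simp
      · -- head char is not '%'
        obtain ⟨q0, rest', hq⟩ := List.exists_cons_of_ne_nil (sp_ne_nil t)
        have e : sp (c :: t) = (c :: q0) :: rest' := by rw [sp]; simp [hc, hq]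
        rw [e] at hsp
        injection hsp with h1 h2
        subst h1; subst h2
        have hIH := ih t hlt q0 rest' hq
        rw [pvScanB.eq_def]
        simp only [if_neg hc]
        rw [hIH]
        cases pvLoopA rest' <;> simp

-- ===== VERDICT (by name: the statement is the Claim_ definition above) =====
theorem unquote_unreserved_spec : Claim_equal_unquote_unreserved := by
  intro uri _
  unfold Spec_unquote_unreserved unquote_unreserved unquote_unreserved_alt
  rw [splitOn_eq_sp]
  obtain ⟨r, hr⟩ := sp_head uri.toList
  rw [hr, key uri.toList.length uri.toList le_rfl _ _ hr]
  cases h : pvLoopA r with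
  | none => simp [h]
  | some qs => simp [h, join_nil_flatten]
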